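-- pv_equiv track=rewrite | github.com/Prince20061712/JARVIS-master | jarvis-system/backend/knowledge/rag_engine/syllabus_aware_rag.py | _assign_topic
-- ===== SOURCE A (Python) =====
-- from typing import List, Dict, Any, Optional, Tuple, Union
--
-- def _assign_topic(text: str, topics: List[str]) -> Optional[str]:
--     """Assign the most relevant topic to a chunk"""
--     if not topics:
--         return None
--
--     # Simple keyword matching
--     text_lower = text.lower()
--     topic_scores = {}
--
--     for topic in topics:
--         score = text_lower.count(topic.lower())
--         if score > 0:
--             topic_scores[topic] = score
--
--     if topic_scores:
--         return max(topic_scores.items(), key=lambda x: x[1])[0]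
--
--     return topics[0]  # Default to first topic
-- ===== SOURCE B (Python) =====
-- from typing import List, Optional
--
-- def _assign_topic(text: str, topics: List[str]) -> Optional[str]:
--     if not topics:
--         return None
--     text_lower = text.lower()
--     best_topic: Optional[str] = None
--     best_score = 0
--     for topic in topics:
--         score = text_lower.count(topic.lower())
--         if score > best_score:
--             best_topic, best_score = topic, score
--     return best_topic if best_topic is not None else topics[0]
-- ===== Notes on version B (the rewrite author's own statement) =====
-- stated objective: simpler
-- what changed: Replaced the intermediate dict of positive scores plus a final max() pass with a single running-maximum loop that keeps only best_topic/best_score (strict > reproduces first-in-order tie-breaking and the topics[0] fallback).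
import Mathlib
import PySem

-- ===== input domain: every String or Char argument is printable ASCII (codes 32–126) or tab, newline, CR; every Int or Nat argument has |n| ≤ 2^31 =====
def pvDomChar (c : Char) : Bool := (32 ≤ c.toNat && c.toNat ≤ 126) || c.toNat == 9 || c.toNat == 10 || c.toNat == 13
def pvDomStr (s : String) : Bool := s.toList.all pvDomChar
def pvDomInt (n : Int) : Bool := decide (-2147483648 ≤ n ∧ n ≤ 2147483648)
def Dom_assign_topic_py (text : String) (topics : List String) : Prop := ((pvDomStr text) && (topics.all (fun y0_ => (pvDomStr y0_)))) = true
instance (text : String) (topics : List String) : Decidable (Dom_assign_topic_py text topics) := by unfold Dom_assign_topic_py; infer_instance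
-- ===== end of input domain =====

-- B replaces A's dict-of-positive-scores plus final max() with a single running-maximum loop (simpler; same cost).


-- ===== PORT A =====
def assign_topic_py (text : String) (topics : List String) : Option String :=
  if topics = [] then none
  else
    let text_lower := PySem.Str.lower text
    let topic_scores : PySem.Dict String Int :=
      topics.foldl (fun d topic =>
        let score : Int := (PySem.Str.count text_lower (PySem.Str.lower topic) : Int)
        if 0 < score then d.insert topic score else d) ⟨[]⟩
    if topic_scores.items ≠ [] then
      (PySem.List.max? topic_scores.items (fun x => x.2)).map (fun x => x.1)
    else
      topics.head?   -- topics[0]; topics ≠ [] on this branch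

-- ===== PORT B =====
def assign_topic_py_alt (text : String) (topics : List String) : Option String :=
  match topics with
  | [] => none
  | t0 :: _ =>
    let text_lower := PySem.Str.lower text
    let best := topics.foldl (fun (acc : Option String × Int) topic =>
        let score : Int := (PySem.Str.count text_lower (PySem.Str.lower topic) : Int)
        if acc.2 < score then (some topic, score) else acc) (none, 0)
    match best.1 with
    | some t => some t
    | none => some t0

-- ===== PRECONDITION & SPEC =====
def Spec_assign_topic_py (text : String) (topics : List String) (out : Option String) : Prop := out = assign_topic_py_alt text topics
instance (text : String) (topics : List String) (out : Option String) : Decidable (Spec_assign_topic_py text topics out) := by unfold Spec_assign_topic_py; infer_instance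

-- ===== CLAIM (what is proved, stated in full; the proofs are below) =====
def Claim_equal_assign_topic_py : Prop := ∀ (text : String) (topics : List String), Dom_assign_topic_py text topics → Spec_assign_topic_py text topics (assign_topic_py text topics)

-- ===== LEMMAS AND PROOFS =====

-- the score of a topic, for fixed lowered text
def pvScore (tl topic : String) : Int := (PySem.Str.count tl (PySem.Str.lower topic) : Int)

-- loop invariant tying A's dict of positive scores to B's running (best, score)
def pvInv (tl : String) (d : PySem.Dict String Int) (b : Option String) (s : Int) : Prop :=
  (∀ p ∈ d.items, p.2 = pvScore tl p.1) ∧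
  (b = none → d.items = [] ∧ s = 0) ∧
  (∀ t, b = some t → 0 < s ∧ PySem.List.max? d.items (fun x => x.2) = some (t, s))

lemma pvMax?_append_singleton {α κ : Type} [LinearOrder κ] (l : List α) (x : α) (key : α → κ) :
    PySem.List.max? (l ++ [x]) key =
      match PySem.List.max? l key with
      | none => some x
      | some m => if key m < key x then some x else some m := by
  simp only [PySem.List.max?, List.foldl_append, List.foldl_cons, List.foldl_nil]
  rfl

lemma pvLoop (tl : String) (rest : List String) (d : PySem.Dict String Int)
    (b : Option String) (s : Int) (h : pvInv tl d b s) :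
    pvInv tl
      (rest.foldl (fun d topic =>
        let score : Int := (PySem.Str.count tl (PySem.Str.lower topic) : Int)
        if 0 < score then d.insert topic score else d) d)
      (rest.foldl (fun (acc : Option String × Int) topic =>
        let score : Int := (PySem.Str.count tl (PySem.Str.lower topic) : Int)
        if acc.2 < score then (some topic, score) else acc) (b, s)).1
      (rest.foldl (fun (acc : Option String × Int) topic =>
        let score : Int := (PySem.Str.count tl (PySem.Str.lower topic) : Int)
        if acc.2 < score then (some topic, score) else acc) (b, s)).2 := by
  induction rest generalizing d b s with
  | nil => exact h
  | cons topic rest ih =>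
    obtain ⟨hvals, hnone, hsome⟩ := h
    simp only [List.foldl_cons]
    set sc : Int := (PySem.Str.count tl (PySem.Str.lower topic) : Int) with hsc
    have hsc0 : 0 ≤ sc := by positivity
    have hs0 : 0 ≤ s := by
      cases b with
      | none => have := hnone rfl; omega
      | some t => have := hsome t rfl; omega
    by_cases hpos : 0 < sc
    · rw [if_pos hpos]
      by_cases hcont : d.contains topic = true
      · -- key already present: insert rewrites the same value in place, items unchanged
        have hmem : (topic, sc) ∈ d.items := by
          simp only [PySem.Dict.contains, List.any_eq_true] at hcont
          obtain ⟨p, hp, hpe⟩ := hcont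
          have hk : p.1 = topic := by simpa using hpe
          have hv := hvals p hp
          have hpeq : p = (topic, sc) := by
            cases p with
            | mk a bb => simp only at hk; subst hk; simp_all [pvScore]
          exact hpeq ▸ hp
        have hins : (d.insert topic sc).items = d.items := by
          simp only [PySem.Dict.insert, hcont, if_true]
          have hfix : ∀ p ∈ d.items,
              (if (p.1 == topic) = true then ((topic, sc) : String × Int) else p) = id p := by
            intro p hp
            by_cases he : (p.1 == topic) = true
            · have hk : p.1 = topic := by simpa using he
              have hv := hvals p hp
              cases p with
              | mk a bb =>
                simp only at hk; subst hk
                simp_all [pvScore]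
            · simp [he]
          exact (List.map_congr_left hfix).trans (List.map_id _)
        have hble : ¬ s < sc := by
          cases b with
          | none =>
            exfalso; rw [(hnone rfl).1] at hmem; simp at hmem
          | some t =>
            have h2 := (hsome t rfl).2
            have := PySem.List.max?_isMax h2 (topic, sc) hmem
            simp only at this; omega
        rw [if_neg hble]
        refine ih _ b s ⟨?_, ?_, ?_⟩
        · intro p hp; rw [hins] at hp; exact hvals p hp
        · intro hb0; rw [hins]; exact hnone hb0
        · intro t ht; rw [hins]; exact hsome t ht
      · -- new key: items grow by one at the back
        have hins : (d.insert topic sc).items = d.items ++ [(topic, sc)] := by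
          simp [PySem.Dict.insert, hcont]
        have hvals' : ∀ p ∈ (d.insert topic sc).items, p.2 = pvScore tl p.1 := by
          intro p hp
          rw [hins] at hp
          rcases List.mem_append.mp hp with h1 | h2
          · exact hvals p h1
          · simp only [List.mem_singleton] at h2; subst h2; rfl
        have hstep := pvMax?_append_singleton d.items ((topic, sc) : String × Int)
          (fun x => x.2)
        by_cases hlt : s < sc
        · rw [if_pos hlt]
          refine ih _ (some topic) sc ⟨hvals', ?_, ?_⟩
          · intro h0; exact absurd h0 (by simp)
          · intro t ht
            have hteq : t = topic := by injection ht with h; exact h.symm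
            subst hteq
            refine ⟨hpos, ?_⟩
            rw [hins, hstep]
            cases b with
            | none =>
              rw [(hnone rfl).1]
              simp [PySem.List.max?]
            | some t' =>
              rw [(hsome t' rfl).2]
              simp only
              rw [if_pos hlt]
        · rw [if_neg hlt]
          cases b with
          | none =>
            exfalso; have := hnone rfl; omega
          | some t =>
            obtain ⟨hspos, hmax⟩ := hsome t rfl
            refine ih _ (some t) s ⟨hvals', ?_, ?_⟩
            · intro h0; exact absurd h0 (by simp)
            · intro t' ht'
              have hteq : t' = t := by injection ht' with h; exact h.symm
              subst hteq
              refine ⟨hspos, ?_⟩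
              rw [hins, hstep, hmax]
              simp only
              rw [if_neg hlt]
    · rw [if_neg hpos, if_neg (show ¬ s < sc by omega)]
      exact ih d b s ⟨hvals, hnone, hsome⟩

lemma pvFinal (text : String) (topics : List String) :
    assign_topic_py text topics = assign_topic_py_alt text topics := by
  cases topics with
  | nil => rfl
  | cons t0 rest =>
    have hinv0 : pvInv (PySem.Str.lower text) ⟨[]⟩ none 0 := by
      refine ⟨?_, ?_, ?_⟩
      · intro p hp; simp at hp
      · intro _; exact ⟨rfl, rfl⟩
      · intro t ht; exact absurd ht (by simp)
    have h := pvLoop (PySem.Str.lower text) (t0 :: rest) ⟨[]⟩ none 0 hinv0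
    change
      (if (t0 :: rest : List String) = [] then none
       else
        if ((t0 :: rest).foldl (fun d topic =>
              let score : Int := (PySem.Str.count (PySem.Str.lower text) (PySem.Str.lower topic) : Int)
              if 0 < score then d.insert topic score else d) (⟨[]⟩ : PySem.Dict String Int)).items ≠ [] then
          (PySem.List.max? ((t0 :: rest).foldl (fun d topic =>
              let score : Int := (PySem.Str.count (PySem.Str.lower text) (PySem.Str.lower topic) : Int)
              if 0 < score then d.insert topic score else d) (⟨[]⟩ : PySem.Dict String Int)).items
            (fun x => x.2)).map (fun x => x.1)
        else (t0 :: rest).head?)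
      =
      (match ((t0 :: rest).foldl (fun (acc : Option String × Int) topic =>
              let score : Int := (PySem.Str.count (PySem.Str.lower text) (PySem.Str.lower topic) : Int)
              if acc.2 < score then (some topic, score) else acc) (none, 0)).1 with
       | some t => some t
       | none => some t0)
    set d := ((t0 :: rest).foldl (fun d topic =>
        let score : Int := (PySem.Str.count (PySem.Str.lower text) (PySem.Str.lower topic) : Int)
        if 0 < score then d.insert topic score else d) (⟨[]⟩ : PySem.Dict String Int)) with hd
    set r := ((t0 :: rest).foldl (fun (acc : Option String × Int) topic =>
        let score : Int := (PySem.Str.count (PySem.Str.lower text) (PySem.Str.lower topic) : Int)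
        if acc.2 < score then (some topic, score) else acc) (none, 0)) with hr
    obtain ⟨hvals, hnone, hsome⟩ := h
    rw [if_neg (by simp : ¬ (t0 :: rest : List String) = [])]
    rcases hre : r.1 with _ | t
    · -- no positive score anywhere: dict empty, both return the first topic
      obtain ⟨hnil, _⟩ := hnone hre
      rw [hnil]
      simp
    · obtain ⟨hspos, hmax⟩ := hsome t hre
      have hne : d.items ≠ [] := by
        intro hnil
        rw [hnil] at hmax
        simp [PySem.List.max?] at hmax
      rw [if_pos hne, hmax]
      rfl

-- ===== VERDICT (by name: the statement is the Claim_ definition above) =====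
theorem assign_topic_py_spec : Claim_equal_assign_topic_py := by
  intro text topics _
  exact pvFinal text topics
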